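-- pv_equiv track=rewrite | github.com/xuzpgroup/ZianZhang | FatigueData-AM2022/TEXTract/parser/doc_parser.py | _ifskip
-- ===== SOURCE A (Python) =====
-- def _ifskip(string):
--     flag=0
--     stop=['abbre','Bib','Ack','author','affiliation','corresponding', \
--           'editor','right','info','cite','url']
--     for sw in stop:
--         if sw in string:
--             flag=1
--             break
--
--     return flag
-- ===== SOURCE B (Python) =====
-- def _ifskip(string):
--     stop = {'abbre', 'Bib', 'Ack', 'author', 'affiliation', 'corresponding',
--             'editor', 'right', 'info', 'cite', 'url'}
--     lengths = sorted({len(w) for w in stop})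
--     n = len(string)
--     for L in lengths:
--         for i in range(n - L + 1):
--             if string[i:i+L] in stop:
--                 return 1
--     return 0
-- ===== Notes on version B (the rewrite author's own statement) =====
-- stated objective: alternative
-- what changed: Instead of one substring scan per stop word, B puts the stop words in a hash set, collects the distinct word lengths, and slides a window of each length over the string testing set membership, so the per-word inner scans disappear.
import Mathlib
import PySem

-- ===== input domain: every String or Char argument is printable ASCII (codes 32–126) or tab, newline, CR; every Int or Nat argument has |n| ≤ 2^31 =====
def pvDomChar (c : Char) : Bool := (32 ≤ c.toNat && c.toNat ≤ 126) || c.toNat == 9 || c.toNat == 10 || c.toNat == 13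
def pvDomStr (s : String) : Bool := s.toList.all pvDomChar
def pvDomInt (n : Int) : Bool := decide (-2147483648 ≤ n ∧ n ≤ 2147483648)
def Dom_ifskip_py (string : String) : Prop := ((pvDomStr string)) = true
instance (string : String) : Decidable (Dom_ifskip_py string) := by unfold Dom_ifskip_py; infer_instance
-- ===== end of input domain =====

-- B replaces A's per-word substring scans by a hash-set of stop words and a sliding
-- window of each distinct word length tested for set membership (alternative; not claimed faster).

-- ===== PORT A =====
-- the 'for sw in stop: if sw in string: flag=1; break' loop; returns the flag
def ifskipGo (string : String) : List String → Int
  | [] => 0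
  | sw :: rest => if PySem.Str.isIn sw string then 1 else ifskipGo string rest

def ifskip_py (string : String) : Int :=
  ifskipGo string ["abbre", "Bib", "Ack", "author", "affiliation", "corresponding",
                   "editor", "right", "info", "cite", "url"]

-- ===== PORT B =====
-- inner 'for i in range(n-L+1): if string[i:i+L] in stop: return 1'
-- (range(n-L+1) is empty for L > n, matched exactly by Nat 'n + 1 - L';
--  string[i:i+L] with 0 ≤ i, i+L ≤ n is exactly (l.drop i).take L)
def ifskipWindow (stopset : PySem.Set (List Char)) (l : List Char) (L : Nat) : Bool :=
  (List.range (l.length + 1 - L)).any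
    (fun i => PySem.Set.contains stopset ((l.drop i).take L))

-- outer 'for L in lengths: … return 1 … / return 0'
def ifskipLoop (stopset : PySem.Set (List Char)) (l : List Char) : List Nat → Int
  | [] => 0
  | L :: rest => if ifskipWindow stopset l L then 1 else ifskipLoop stopset l rest

def ifskip_py_alt (string : String) : Int :=
  let stopw := ["abbre", "Bib", "Ack", "author", "affiliation", "corresponding",
                "editor", "right", "info", "cite", "url"].map String.toList
  let stopset := PySem.Set.ofList stopw
  let lengths := PySem.List.sorted (PySem.Set.ofList (stopw.map List.length)) (fun x => x) false
  ifskipLoop stopset string.toList lengths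

-- ===== PRECONDITION & SPEC =====
def Spec_ifskip_py (string : String) (out : Int) : Prop := out = ifskip_py_alt string
instance (string : String) (out : Int) : Decidable (Spec_ifskip_py string out) := by unfold Spec_ifskip_py; infer_instance

-- ===== CLAIM (what is proved, stated in full; the proofs are below) =====
def Claim_equal_ifskip_py : Prop := ∀ (string : String), Dom_ifskip_py string → Spec_ifskip_py string (ifskip_py string)

-- ===== LEMMAS AND PROOFS =====

-- A's loop returns 1 iff some stop word occurs as a substring
theorem ifskipGo_eq (s : String) (stop : List String) :
    ifskipGo s stop = if stop.any (fun sw => PySem.Chars.isIn sw.toList s.toList) then 1 else 0 := by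
  induction stop with
  | nil => simp [ifskipGo]
  | cons sw rest ih =>
      by_cases h : PySem.Chars.isIn sw.toList s.toList = true
      · simp [ifskipGo, h]
      · simp [ifskipGo, h, ih]

-- B's loop returns 1 iff some length's window scan hits
theorem ifskipLoop_eq (stopset : PySem.Set (List Char)) (l : List Char) (lengths : List Nat) :
    ifskipLoop stopset l lengths
      = if lengths.any (fun L => ifskipWindow stopset l L) then 1 else 0 := by
  induction lengths with
  | nil => simp [ifskipLoop]
  | cons L rest ih =>
      by_cases h : ifskipWindow stopset l L = true
      · simp [ifskipLoop, h]
      · simp [ifskipLoop, h, ih]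

-- a window of the string that lies in the stop set exhibits an infix stop word,
-- and conversely every stop-word infix is hit at the window of its own length
theorem anyWindow_iff (stopw : List (List Char)) (lengths : List Nat)
    (hcov : ∀ w ∈ stopw, w.length ∈ lengths) (l : List Char) :
    (lengths.any (fun L => ifskipWindow (PySem.Set.ofList stopw) l L) = true)
      ↔ ∃ w ∈ stopw, w <:+: l := by
  constructor
  · intro h
    simp only [List.any_eq_true, ifskipWindow, PySem.Set.contains_iff, PySem.Set.mem_ofList] at h
    obtain ⟨L, _, i, _, hw⟩ := h
    refine ⟨(l.drop i).take L, hw, ?_⟩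
    exact List.infix_iff_prefix_suffix.mpr ⟨l.drop i, List.take_prefix _ _, List.drop_suffix _ _⟩
  · rintro ⟨w, hwmem, hinf⟩
    obtain ⟨s, t, hl⟩ := hinf
    simp only [List.any_eq_true, ifskipWindow, PySem.Set.contains_iff, PySem.Set.mem_ofList]
    refine ⟨w.length, hcov w hwmem, s.length, ?_, ?_⟩
    · have : l.length = s.length + w.length + t.length := by
        subst hl; simp; omega
      simp only [List.mem_range]
      omega
    · subst hl
      rw [List.append_assoc, List.drop_left, List.take_left]
      exact hwmem

-- ===== VERDICT (by name: the statement is the Claim_ definition above) =====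
theorem ifskip_py_spec : Claim_equal_ifskip_py := by
  intro str _
  unfold Spec_ifskip_py ifskip_py ifskip_py_alt
  rw [ifskipGo_eq, ifskipLoop_eq]
  have hcov : ∀ w ∈ (["abbre", "Bib", "Ack", "author", "affiliation", "corresponding",
      "editor", "right", "info", "cite", "url"].map String.toList),
      w.length ∈ PySem.List.sorted
        (PySem.Set.ofList ((["abbre", "Bib", "Ack", "author", "affiliation", "corresponding",
          "editor", "right", "info", "cite", "url"].map String.toList).map List.length))
        (fun x => x) false := by decide
  have h1 := anyWindow_iff _ _ hcov str.toList
  have h2 : (["abbre", "Bib", "Ack", "author", "affiliation", "corresponding",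
      "editor", "right", "info", "cite", "url"].any
        (fun sw => PySem.Chars.isIn sw.toList str.toList) = true)
      ↔ ∃ w ∈ (["abbre", "Bib", "Ack", "author", "affiliation", "corresponding",
          "editor", "right", "info", "cite", "url"].map String.toList), w <:+: str.toList := by
    simp only [List.any_eq_true, PySem.Chars.isIn_iff_infix, List.mem_map]
    constructor
    · rintro ⟨sw, hsw, h⟩; exact ⟨sw.toList, ⟨sw, hsw, rfl⟩, h⟩
    · rintro ⟨w, ⟨sw, hsw, rfl⟩, h⟩; exact ⟨sw, hsw, h⟩
  by_cases hA : ∃ w ∈ (["abbre", "Bib", "Ack", "author", "affiliation", "corresponding",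
      "editor", "right", "info", "cite", "url"].map String.toList), w <:+: str.toList
  · rw [if_pos (h2.mpr hA), if_pos (h1.mpr hA)]
  · rw [if_neg (fun hc => hA (h2.mp hc)), if_neg (fun hc => hA (h1.mp hc))]
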